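-- pv_equiv track=rewrite | github.com/avs-git/GB_Python_algorythm | lesson2/5.py | char_table
-- ===== SOURCE A (Python) =====
-- def char_table(start, stop):
--     row = ''
--     col = 0
--     for i in range(start, stop):
--         row += f'{str(i):<3} {chr(i):<3}'
--         col += 1
--         if not col % 10:
--             row += '\n'
--
--     return row
-- ===== SOURCE B (Python) =====
-- def char_table(start, stop):
--     cells = [f'{str(i):<3} {chr(i):<3}' for i in range(start, stop)]
--     parts = []
--     g = 0
--     while g < len(cells):
--         group = cells[g:g + 10]
--         parts.append(''.join(group) + ('\n' if len(group) == 10 else ''))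
--         g += 10
--     return ''.join(parts)
-- ===== Notes on version B (the rewrite author's own statement) =====
-- stated objective: alternative
-- what changed: B precomputes the list of formatted cells and chunks it into groups of 10 joined per row (newline only after a complete group), replacing A's single fold with a running col%10 counter.
import Mathlib
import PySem

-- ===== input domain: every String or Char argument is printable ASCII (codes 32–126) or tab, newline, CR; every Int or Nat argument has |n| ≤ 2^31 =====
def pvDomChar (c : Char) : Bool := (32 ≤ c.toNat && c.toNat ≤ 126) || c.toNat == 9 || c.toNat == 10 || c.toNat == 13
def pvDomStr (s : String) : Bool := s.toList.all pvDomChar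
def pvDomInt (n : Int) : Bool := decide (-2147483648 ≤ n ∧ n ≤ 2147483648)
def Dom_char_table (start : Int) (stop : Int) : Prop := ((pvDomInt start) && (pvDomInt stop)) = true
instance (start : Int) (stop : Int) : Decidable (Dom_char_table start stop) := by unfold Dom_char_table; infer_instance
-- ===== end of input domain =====

-- B chunks a precomputed list of formatted cells into rows of 10 instead of A's running col % 10 counter; same output (objective: alternative decomposition).

-- ===== PORT A =====
-- shared cell formatter, the f-string f'{str(i):<3} {chr(i):<3}' of both programs:
-- '<3' pads on the right with spaces to 3 characters (exact: both str(i) and the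
-- one-char chr(i) are measured in characters); chr(i) is Char.ofNat, exact for the
-- valid, non-surrogate code points admitted by Pre_char_table.
def pvPad3 (s : String) : String :=
  s ++ String.ofList (List.replicate (3 - PySem.Str.len s).toNat ' ')
def pvChr (i : Int) : Char := Char.ofNat i.toNat
def pvCell (i : Int) : String := pvPad3 (PySem.Int.toStr i) ++ " " ++ pvPad3 (String.ofList [pvChr i])

def pvStepA (s : String × Int) (i : Int) : String × Int :=
  let row := s.1 ++ pvCell i
  let col := s.2 + 1
  (if PySem.Int.mod col 10 = 0 then row ++ "\n" else row, col)

def char_table (start : Int) (stop : Int) : String :=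
  ((PySem.List.pyRange start stop 1).foldl pvStepA ("", 0)).1

-- ===== PORT B =====
-- the while loop of Source B: each step handles the next 10 cells (cells[g:g+10], g += 10 =
-- take 10 of what is left, recurse on drop 10); newline only after a full group
def pvRows : List String → String
  | [] => ""
  | c :: cs =>
      let group := List.take 10 (c :: cs)
      (PySem.Str.join "" group ++ (if group.length = 10 then "\n" else ""))
        ++ pvRows (List.drop 10 (c :: cs))
  termination_by l => l.length
  decreasing_by simp

def char_table_alt (start : Int) (stop : Int) : String :=
  pvRows ((PySem.List.pyRange start stop 1).map pvCell)

-- ===== PRECONDITION & SPEC =====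
-- Pre_ excludes the inputs where chr(i) raises ValueError (some i in range(start, stop)
-- is negative or ≥ 0x110000) and — a stated narrowing beyond A's raising — ranges that
-- contain a surrogate code point 0xD800–0xDFFF: Python's chr returns a lone-surrogate
-- string there, which Lean's Char/String cannot represent, so neither port is
-- Python-exact on those inputs (both Pythons still agree there).
def Pre_char_table (start : Int) (stop : Int) : Prop :=
  stop ≤ start ∨ (0 ≤ start ∧ stop ≤ 1114112 ∧ (stop ≤ 55296 ∨ 57344 ≤ start))
instance (start : Int) (stop : Int) : Decidable (Pre_char_table start stop) := by
  unfold Pre_char_table; infer_instance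
def pvWitness_char_table : Int × Int := (65, 91)

def Spec_char_table (start : Int) (stop : Int) (out : String) : Prop := out = char_table_alt start stop
instance (start : Int) (stop : Int) (out : String) : Decidable (Spec_char_table start stop out) := by unfold Spec_char_table; infer_instance

-- ===== CLAIM (what is proved, stated in full; the proofs are below) =====
def Claim_equal_char_table : Prop := ∀ (start : Int) (stop : Int), Dom_char_table start stop → Pre_char_table start stop → Spec_char_table start stop (char_table start stop)

-- ===== LEMMAS AND PROOFS =====

-- equation lemmas for the well-founded pvRows
theorem pvRows_nil : pvRows [] = "" := by rw [pvRows.eq_def]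

theorem pvRows_cons (c : String) (cs : List String) :
    pvRows (c :: cs)
      = (PySem.Str.join "" (List.take 10 (c :: cs))
          ++ (if (List.take 10 (c :: cs)).length = 10 then "\n" else ""))
        ++ pvRows (List.drop 10 (c :: cs)) := by
  rw [pvRows.eq_def]

theorem pvRows_ne_nil (l : List String) (h : l ≠ []) :
    pvRows l
      = (PySem.Str.join "" (List.take 10 l)
          ++ (if (List.take 10 l).length = 10 then "\n" else ""))
        ++ pvRows (List.drop 10 l) := by
  cases l with
  | nil => exact absurd rfl h
  | cons c cs => exact pvRows_cons c cs

-- ''.join splits off its head (empty separator)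
theorem pvJoin_cons (x : String) (xs : List String) :
    PySem.Str.join "" (x :: xs) = x ++ PySem.Str.join "" xs := by
  apply String.toList_inj.mp
  cases xs with
  | nil =>
      simp only [PySem.Str.toList_join]
      simp [PySem.Chars.join_singleton, PySem.Chars.join_nil]
  | cons b r =>
      simp only [PySem.Str.toList_join]
      simp [PySem.Chars.join_cons_cons]

-- appending each cell in turn is appending their join
theorem pvFold_cells (l : List Int) : ∀ (r : String),
    l.foldl (fun s i => s ++ pvCell i) r = r ++ PySem.Str.join "" (l.map pvCell) := by
  induction l with
  | nil =>
      intro r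
      apply String.toList_inj.mp
      simp only [List.foldl_nil, List.map_nil, String.toList_append, PySem.Str.toList_join]
      simp [PySem.Chars.join_nil]
  | cons a t ih =>
      intro r
      apply String.toList_inj.mp
      simp only [List.foldl_cons, List.map_cons, ih, pvJoin_cons]
      simp

-- ''.join over an appended last element
theorem pvJoin_concat (xs : List String) (x : String) :
    PySem.Str.join "" (xs ++ [x]) = PySem.Str.join "" xs ++ x := by
  induction xs with
  | nil =>
      apply String.toList_inj.mp
      simp only [List.nil_append, PySem.Str.toList_join, String.toList_append]
      simp [PySem.Chars.join_singleton, PySem.Chars.join_nil]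
  | cons y ys ihy =>
      apply String.toList_inj.mp
      simp only [List.cons_append, pvJoin_cons, ihy]
      simp

-- inside a row (no boundary reached) A's fold appends the cells and counts up
theorem pvFoldA_partial (l : List Int) : ∀ (r : String) (c : Int),
    c % 10 + l.length ≤ 9 →
    l.foldl pvStepA (r, c) = (l.foldl (fun s i => s ++ pvCell i) r, c + l.length) := by
  induction l with
  | nil => intro r c _; simp
  | cons a t ih =>
      intro r c h
      simp only [List.length_cons] at h
      have hne : ¬ PySem.Int.mod (c + 1) 10 = 0 := by
        rw [PySem.Int.mod_eq_emod_of_pos (by norm_num)]; omega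
      simp only [List.foldl_cons, pvStepA, if_neg hne]
      rw [ih (r ++ pvCell a) (c + 1) (by omega)]
      simp only [Prod.mk.injEq, List.length_cons]
      refine ⟨by first | rfl | trivial, by push_cast; omega⟩

-- a full group of 10 cells from a row boundary: cells joined, then a newline
theorem pvFoldA_chunk (l : List Int) (r : String) (c : Int)
    (hlen : l.length = 10) (hc : c % 10 = 0) :
    l.foldl pvStepA (r, c)
      = (r ++ PySem.Str.join "" (l.map pvCell) ++ "\n", c + 10) := by
  rcases List.eq_nil_or_concat l with rfl | ⟨L, x, rfl⟩
  · simp at hlen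
  · have hL : L.length = 9 := by simp at hlen; omega
    rw [List.concat_eq_append, List.foldl_append,
        pvFoldA_partial L r c (by omega)]
    have hz : PySem.Int.mod (c + L.length + 1) 10 = 0 := by
      rw [PySem.Int.mod_eq_emod_of_pos (by norm_num)]; omega
    simp only [List.foldl_cons, List.foldl_nil, pvStepA, if_pos hz, Prod.mk.injEq]
    constructor
    · apply String.toList_inj.mp
      rw [pvFold_cells]
      have hm : (L ++ [x]).map pvCell = L.map pvCell ++ [pvCell x] := by simp
      rw [hm, pvJoin_concat]
      simp
    · rw [hL]; push_cast; omega

-- main invariant: from any row boundary, A's fold is B's chunked rows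
theorem pvFoldA_rows (n : Nat) : ∀ (l : List Int), l.length ≤ n → ∀ (r : String) (c : Int),
    c % 10 = 0 → (l.foldl pvStepA (r, c)).1 = r ++ pvRows (l.map pvCell) := by
  induction n with
  | zero =>
      intro l hl r c _
      have : l = [] := List.length_eq_zero_iff.mp (by omega)
      subst this
      apply String.toList_inj.mp
      simp [pvRows_nil]
  | succ n ih =>
      intro l hl r c hc
      by_cases hsmall : l.length ≤ 9
      · rw [pvFoldA_partial l r c (by omega), pvFold_cells]
        cases l with
        | nil =>
            apply String.toList_inj.mp
            simp only [List.map_nil, pvRows_nil, PySem.Str.toList_join, String.toList_append]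
            simp [PySem.Chars.join_nil]
        | cons a t =>
            have hlen10 : (List.map pvCell (a :: t)).length ≤ 10 := by
              simp at hsmall ⊢; omega
            have htake : List.take 10 (List.map pvCell (a :: t)) = List.map pvCell (a :: t) :=
              List.take_of_length_le hlen10
            have hdrop : List.drop 10 (List.map pvCell (a :: t)) = [] :=
              List.drop_eq_nil_of_le hlen10
            have hne10 : ¬ (List.take 10 (List.map pvCell (a :: t))).length = 10 := by
              rw [htake]; simp at hsmall ⊢; omega
            rw [pvRows_ne_nil _ (by simp), if_neg hne10, htake, hdrop, pvRows_nil]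
            apply String.toList_inj.mp
            simp
      · -- a full row of 10, then recurse on the rest
        have h10 : (l.take 10).length = 10 := by rw [List.length_take]; omega
        have h10' : (List.map pvCell (l.take 10)).length = 10 := by
          rw [List.length_map]; exact h10
        have hdl : (l.drop 10).length ≤ n := by rw [List.length_drop]; omega
        have hne : List.map pvCell (l.take 10) ++ List.map pvCell (l.drop 10) ≠ [] := by
          intro hcontra
          rw [List.append_eq_nil_iff] at hcontra
          have := congrArg List.length hcontra.1
          rw [h10'] at this
          simp at this
        have hsplit : l = l.take 10 ++ l.drop 10 := (List.take_append_drop 10 l).symm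
        conv_lhs => rw [hsplit]
        rw [List.foldl_append, pvFoldA_chunk (l.take 10) r c h10 hc,
            ih (l.drop 10) hdl _ (c + 10) (by omega)]
        conv_rhs => rw [hsplit]
        rw [List.map_append, pvRows_ne_nil _ hne,
            List.take_left' h10', List.drop_left' h10', if_pos h10']
        apply String.toList_inj.mp
        simp

-- ===== VERDICT (by name: the statement is the Claim_ definition above) =====
theorem char_table_spec : Claim_equal_char_table := by
  intro start stop _ _
  unfold Spec_char_table char_table char_table_alt
  exact pvFoldA_rows (PySem.List.pyRange start stop 1).length _ le_rfl "" 0 (by norm_num)
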